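-- pv_equiv track=rewrite | github.com/RPI-DSPlab/iteration-learned | main.py | determineLearnedMetric
-- ===== SOURCE A (Python) =====
-- def determineLearnedMetric(learning_history_dict):
--     """
--     This function determines the learned metric for the model, it finds the iteration or epoch which the model has
--     learned a datapoint
--     :param learning_history_dict: dictionary containing the learning history of the model, if -1, then the model can't learn
--         this datapoint
--     """
--     learned_metric_dict = {}
--     for i in learning_history_dict:
--         learned_itr = 0
--         learned_bool = False
--         curr_itr = 0
--         for j in learning_history_dict[i]:
--             if j == True:  # if the model has learned this datapoint
--                 if learned_bool == False:
--                     learned_itr = curr_itr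
--                 learned_bool = True
--             else:  # if the model has not learned this datapoint or has forgotten it
--                 learned_bool = False
--             curr_itr += 1
--
--         if learned_bool == True:
--             learned_metric_dict[i] = learned_itr
--         else:
--             learned_metric_dict[i] = -1
--
--     return learned_metric_dict
-- ===== SOURCE B (Python) =====
-- def _final_streak_start(history):
--     # count the trailing run of values == True, scanning from the end
--     streak = 0
--     for value in reversed(history):
--         if value == True:
--             streak += 1
--         else:
--             break
--     return len(history) - streak if streak else -1
--
--
-- def determineLearnedMetric(learning_history_dict):
--     return {key: _final_streak_start(history)
--             for key, history in learning_history_dict.items()}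
-- ===== Notes on version B (the rewrite author's own statement) =====
-- stated objective: simpler
-- what changed: Instead of a forward scan that tracks streak-start/learned-flag/counter state over the whole history, B scans each history backwards and just counts the trailing run of True values, returning len - count (or -1 if the run is empty), via a small helper in a dict comprehension.
import Mathlib
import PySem

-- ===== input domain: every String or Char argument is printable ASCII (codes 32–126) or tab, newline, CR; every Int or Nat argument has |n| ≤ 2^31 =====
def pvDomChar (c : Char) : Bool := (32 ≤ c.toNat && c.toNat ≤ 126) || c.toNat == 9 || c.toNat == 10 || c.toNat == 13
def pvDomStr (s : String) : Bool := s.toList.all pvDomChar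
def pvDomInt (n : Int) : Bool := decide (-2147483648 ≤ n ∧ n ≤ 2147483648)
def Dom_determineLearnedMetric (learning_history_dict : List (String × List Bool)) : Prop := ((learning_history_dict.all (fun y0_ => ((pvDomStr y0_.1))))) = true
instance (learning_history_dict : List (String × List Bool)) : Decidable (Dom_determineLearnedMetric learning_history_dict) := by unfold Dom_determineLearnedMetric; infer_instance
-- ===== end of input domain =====

-- B scans each history backwards counting the trailing True-run instead of A's forward
-- scan with streak-start/flag/counter state; same results, simpler decomposition.


-- ===== PORT A =====
-- inner loop body: state (learned_itr, learned_bool, curr_itr)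
def aStep (st : Int × Bool × Int) (j : Bool) : Int × Bool × Int :=
  if j == true then
    (if st.2.1 == false then st.2.2 else st.1, true, st.2.2 + 1)
  else
    (st.1, false, st.2.2 + 1)

-- result of one outer-loop iteration: run the inner loop, then learned_itr or -1
def aResult (hist : List Bool) : Int :=
  let st := hist.foldl aStep (0, false, 0)
  if st.2.1 == true then st.1 else -1

-- the outer loop over the dict's keys; Python's d[i] never raises here (i comes from
-- d's own keys), so getD's default is unreachable
def aLoop (d : PySem.Dict String (List Bool)) : PySem.Dict String Int :=
  d.keys.foldl (fun acc i => acc.insert i (aResult (d.getD i []))) PySem.Dict.empty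

def determineLearnedMetric (learning_history_dict : List (String × List Bool)) : List (String × Int) :=
  (aLoop (PySem.Dict.ofList learning_history_dict)).items

-- ===== PORT B =====
-- the for/break loop over reversed(history) counting values == True
def finalStreakStart (history : List Bool) : Int :=
  let streak := (history.reverse.takeWhile (fun v => v == true)).length
  if streak ≠ 0 then (history.length : Int) - streak else -1

def determineLearnedMetric_alt (learning_history_dict : List (String × List Bool)) : List (String × Int) :=
  (PySem.Dict.ofList learning_history_dict).items.map (fun p => (p.1, finalStreakStart p.2))

-- ===== PRECONDITION & SPEC =====
def Spec_determineLearnedMetric (learning_history_dict : List (String × List Bool)) (out : List (String × Int)) : Prop := out = determineLearnedMetric_alt learning_history_dict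
instance (learning_history_dict : List (String × List Bool)) (out : List (String × Int)) : Decidable (Spec_determineLearnedMetric learning_history_dict out) := by unfold Spec_determineLearnedMetric; infer_instance

-- ===== CLAIM (what is proved, stated in full; the proofs are below) =====
def Claim_equal_determineLearnedMetric : Prop := ∀ (learning_history_dict : List (String × List Bool)), Dom_determineLearnedMetric learning_history_dict → Spec_determineLearnedMetric learning_history_dict (determineLearnedMetric learning_history_dict)

-- ===== LEMMAS AND PROOFS =====

-- characterisation of A's inner fold via B's trailing-streak count
lemma aFold_char (hist : List Bool) :
    (hist.foldl aStep (0, false, 0)).2.2 = (hist.length : Int) ∧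
    ((hist.foldl aStep (0, false, 0)).2.1 = true ↔
      (hist.reverse.takeWhile (fun v => v == true)).length ≠ 0) ∧
    ((hist.reverse.takeWhile (fun v => v == true)).length ≠ 0 →
      (hist.foldl aStep (0, false, 0)).1 =
        (hist.length : Int) - (hist.reverse.takeWhile (fun v => v == true)).length) := by
  induction hist using List.reverseRecOn with
  | nil => simp
  | append_singleton hist b ih =>
    obtain ⟨hc, hb, hi⟩ := ih
    rw [List.foldl_append]
    cases b with
    | false => simp [aStep, hc]
    | true =>
      simp only [List.reverse_append, List.reverse_cons, List.reverse_nil, List.nil_append,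
        List.singleton_append, List.takeWhile_cons, beq_self_eq_true, if_true, List.length_cons]
      refine ⟨by simp [aStep, hc], by simp [aStep], ?_⟩
      intro _
      simp only [List.foldl_cons, List.foldl_nil, aStep, beq_self_eq_true, if_true,
        List.length_append, List.length_cons, List.length_nil]
      by_cases h : (hist.foldl aStep (0, false, 0)).2.1 = true
      · have ht : (hist.reverse.takeWhile (fun v => v == true)).length ≠ 0 := hb.mp h
        simp only [h]
        rw [hi ht]
        push_cast
        simp
      · have ht : (hist.reverse.takeWhile (fun v => v == true)).length = 0 := by
          by_contra hne
          exact h (hb.mpr hne)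
        simp only [Bool.not_eq_true] at h
        rw [ht]
        simp [h, hc]

lemma aResult_eq (hist : List Bool) : aResult hist = finalStreakStart hist := by
  obtain ⟨_, hb, hi⟩ := aFold_char hist
  simp only [aResult, finalStreakStart]
  by_cases h : (hist.reverse.takeWhile (fun v => v == true)).length ≠ 0
  · rw [hb.mpr h, hi h, if_pos h]
    simp
  · simp only [ne_eq, not_not] at h
    have hf : (hist.foldl aStep (0, false, 0)).2.1 = false := by
      cases hc : (hist.foldl aStep (0, false, 0)).2.1
      · rfl
      · exact ((hb.mp hc) h).elim
    rw [hf, h]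
    simp

-- ===== VERDICT (by name: the statement is the Claim_ definition above) =====
theorem determineLearnedMetric_spec : Claim_equal_determineLearnedMetric := by
  intro l _
  unfold Spec_determineLearnedMetric determineLearnedMetric determineLearnedMetric_alt aLoop
  set d := PySem.Dict.ofList l with hd
  have hnd : d.keys.Nodup := PySem.Dict.nodup_keys_ofList l
  have hfold := PySem.Dict.items_foldl_insert_fresh (l := d.keys) (d := PySem.Dict.empty)
        (k := fun i => i) (v := fun i => aResult (d.getD i []))
        (by intro a _; exact PySem.Dict.contains_empty a)
        (by simpa using hnd)
  rw [hfold, PySem.Dict.items_eq_map_keys d hnd []]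
  simp only [List.map_map, Function.comp_def]
  exact List.map_congr_left (fun k _ => by rw [aResult_eq])
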